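-- pv_equiv track=rewrite | github.com/aadityaaacodes/leetcode | trial.py | func
-- ===== SOURCE A (Python) =====
-- def func(st):
--     n = len(st)
--     ret_li = []
--     for i in range(n):
--         c = st[i]
--         try:
--             a = i
--             b = st.index(c, a+1)
--         except:
--             b = n
--
--         if not b == n or b == n:
--             ret_li.append(st[a:b])
--
--     return(ret_li)
-- ===== SOURCE B (Python) =====
-- def func(st):
--     n = len(st)
--     occ = {}  # char -> list of its positions, in order
--     for i, c in enumerate(st):
--         occ[c] = occ.get(c, []) + [i]
--     res = [''] * n
--     for idxs in occ.values():
--         for i, j in zip(idxs, idxs[1:]):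
--             res[i] = st[i:j]
--         res[idxs[-1]] = st[idxs[-1]:]
--     return res
-- ===== Notes on version B (the rewrite author's own statement) =====
-- stated objective: alternative
-- what changed: B groups positions by character in a single pass (char -> occurrence list), then for each character writes the slices between consecutive occurrences (and from the last occurrence to the end) into a position-indexed output array, instead of A's per-index forward rescan with st.index.
import Mathlib
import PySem

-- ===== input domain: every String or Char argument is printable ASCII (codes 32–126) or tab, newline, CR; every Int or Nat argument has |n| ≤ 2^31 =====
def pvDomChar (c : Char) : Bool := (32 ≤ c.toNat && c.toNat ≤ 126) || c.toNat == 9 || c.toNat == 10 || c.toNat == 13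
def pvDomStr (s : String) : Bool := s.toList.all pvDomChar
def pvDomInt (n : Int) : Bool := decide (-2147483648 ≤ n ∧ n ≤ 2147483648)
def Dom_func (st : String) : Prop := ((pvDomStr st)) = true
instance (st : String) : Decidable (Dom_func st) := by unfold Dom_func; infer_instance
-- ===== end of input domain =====

-- B groups positions by character and emits the slice between consecutive occurrences
-- into a position-indexed array, instead of A's per-index st.index rescan (objective: alternative).

-- ===== PORT A =====
def func (st : String) : List String :=
  let n : Int := PySem.Str.len st
  (PySem.List.pyRange 0 n 1).foldl (fun ret_li i =>
    match PySem.Str.pyGet? st i with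
    | none => ret_li                       -- unreachable: i ranges over valid indices
    | some c =>
      let a := i
      -- try: b = st.index(c, a+1)  except: b = n   (st.index raises ValueError ↔ findFrom = -1)
      let f := PySem.Str.findFrom st (String.ofList [c]) (a + 1)
      let b := if f = -1 then n else f
      if (!(b == n)) || (b == n) then ret_li ++ [PySem.Str.slice st (some a) (some b)]
      else ret_li) []

-- ===== PORT B =====
def func_alt (st : String) : List String :=
  let n : Int := PySem.Str.len st
  -- for i, c in enumerate(st): occ[c] = occ.get(c, []) + [i]
  let occ : PySem.Dict Char (List Int) :=
    (PySem.List.enumerate st.toList 0).foldl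
      (fun d ic => d.modify ic.2 [] (· ++ [ic.1])) PySem.Dict.empty
  let res0 : List String := List.replicate n.toNat ""   -- res = [''] * n
  -- for idxs in occ.values(): write the slices; res[i] = v is pySetD (exact: 0 ≤ i < len(res))
  occ.values.foldl
    (fun res idxs =>
      let res :=
        (idxs.zip (idxs.drop 1)).foldl
          (fun res ij => PySem.List.pySetD res ij.1
            (PySem.Str.slice st (some ij.1) (some ij.2))) res
      match PySem.List.pyGet? idxs (-1) with
      | some i => PySem.List.pySetD res i (PySem.Str.slice st (some i) none)
      | none => res)                        -- unreachable: occurrence lists are nonempty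
    res0

-- ===== PRECONDITION & SPEC =====
def Spec_func (st : String) (out : List String) : Prop := out = func_alt st
instance (st : String) (out : List String) : Decidable (Spec_func st out) := by unfold Spec_func; infer_instance

-- ===== CLAIM (what is proved, stated in full; the proofs are below) =====
def Claim_equal_func : Prop := ∀ (st : String), Dom_func st → Spec_func st (func st)

-- ===== LEMMAS AND PROOFS =====

def lastOpt (s : List Char) (c : Char) : Option Int :=
  (PySem.List.enumerate s 0).foldl (fun acc p => if p.2 == c then some p.1 else acc) none

def nxtOpt (s : List Char) (j : Nat) : Option Int :=
  s[j]?.bind (fun c =>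
    ((s.drop (j+1)).findIdx? (fun y => c == y)).map (fun m => ((j + 1 + m : Nat) : Int)))

theorem find_go_singleton (c : Char) (l : List Char) (k : Nat) :
    PySem.Chars.find.go [c] l k =
      match l.findIdx? (fun y => c == y) with
      | some m => ((k + m : Nat) : Int)
      | none => -1 := by
  induction l generalizing k with
  | nil => simp [PySem.Chars.find.go]
  | cons h t ih =>
    rw [PySem.Chars.find.go]
    by_cases hc : c == h
    · simp [hc, List.isPrefixOf, List.findIdx?_cons]
    · simp only [List.isPrefixOf, List.findIdx?_cons, hc, Bool.false_and, ih (k+1)]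
      cases hfi : t.findIdx? (fun y => c == y) with
      | none => simp
      | some m => simp; ring

theorem lastOpt_append (s : List Char) (x : Char) (c : Char) :
    lastOpt (s ++ [x]) c = if x == c then some (s.length : Int) else lastOpt s c := by
  unfold lastOpt
  rw [PySem.List.enumerate_append, List.foldl_append]
  simp [PySem.List.enumerate_cons, PySem.List.enumerate_nil]

theorem lastOpt_none (s : List Char) (c : Char) (h : lastOpt s c = none) :
    ∀ k : Nat, s[k]? ≠ some c := by
  induction s using List.reverseRecOn with
  | nil => intro k; simp
  | append_singleton s x ih =>
    rw [lastOpt_append] at h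
    by_cases hx : x == c
    · simp [hx] at h
    · intro k
      rcases lt_trichotomy k s.length with hk | hk | hk
      · rw [List.getElem?_append_left hk]; exact ih (by simpa [hx] using h) k
      · subst hk
        rw [List.getElem?_append_right (le_refl _)]
        simp_all
      · rw [List.getElem?_append_right (by omega)]
        rw [List.getElem?_eq_none (by simp; omega)]
        simp

theorem lastOpt_some (s : List Char) (c : Char) {v : Int} (h : lastOpt s c = some v) :
    ∃ j0 : Nat, v = (j0 : Int) ∧ j0 < s.length ∧ s[j0]? = some c ∧
      ∀ k : Nat, j0 < k → s[k]? ≠ some c := by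
  induction s using List.reverseRecOn with
  | nil => simp [lastOpt, PySem.List.enumerate_nil] at h
  | append_singleton s x ih =>
    rw [lastOpt_append] at h
    by_cases hx : x == c
    · refine ⟨s.length, ?_, ?_, ?_, ?_⟩
      · simp [hx] at h; omega
      · simp
      · rw [List.getElem?_append_right (le_refl _)]; simp_all
      · intro k hk
        rw [List.getElem?_append_right (by omega)]
        rw [List.getElem?_eq_none (by simp; omega)]
        simp
    · obtain ⟨j0, hv, hlt, hget, hafter⟩ := ih (by simpa [hx] using h)
      refine ⟨j0, hv, by simp; omega, by rw [List.getElem?_append_left hlt]; exact hget, ?_⟩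
      intro k hk
      rcases lt_trichotomy k s.length with hk2 | hk2 | hk2
      · rw [List.getElem?_append_left hk2]; exact hafter k hk
      · subst hk2; rw [List.getElem?_append_right (le_refl _)]; simp_all
      · rw [List.getElem?_append_right (by omega)]
        rw [List.getElem?_eq_none (by simp; omega)]
        simp

theorem mem_drop_ne (s : List Char) (j0 : Nat) (x : Char)
    (hafter : ∀ k : Nat, j0 < k → s[k]? ≠ some x) :
    ∀ y ∈ s.drop (j0+1), (x == y) = false := by
  intro y hy
  obtain ⟨k, hk, hget⟩ := List.mem_iff_getElem.mp hy
  have hkl : j0 + 1 + k < s.length := by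
    have := List.length_drop (i := j0+1) (l := s); omega
  have hy2 : s[j0 + 1 + k]? = some y := by
    rw [List.getElem?_eq_getElem hkl, ← hget, List.getElem_drop]
  have := hafter (j0 + 1 + k) (by omega)
  rw [hy2] at this
  simp only [beq_eq_false_iff_ne, ne_eq]
  intro h; exact this (by rw [h])

theorem nxtOpt_high (s : List Char) (x : Char) (j : Nat) (hj : s.length ≤ j) :
    nxtOpt (s ++ [x]) j = nxtOpt s j := by
  unfold nxtOpt
  rcases eq_or_lt_of_le hj with hj' | hj'
  · rw [List.getElem?_append_right (by omega), List.getElem?_eq_none (l := s) (by omega)]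
    have h1 : j - s.length = 0 := by omega
    rw [h1]
    have h2 : j + 1 - s.length = 1 := by omega
    rw [List.drop_append, List.drop_eq_nil_of_le (by omega), h2]
    simp [← hj']
  · rw [List.getElem?_append_right (by omega),
      List.getElem?_eq_none (l := s) (by omega), List.getElem?_eq_none (by simp; omega)]
    simp

theorem nxtOpt_append (s : List Char) (x : Char) (j : Nat) :
    nxtOpt (s ++ [x]) j =
      match lastOpt s x with
      | some v => if ((j : Int)) = v then some (s.length : Int) else nxtOpt s j
      | none => nxtOpt s j := by
  cases hl : lastOpt s x with
  | none =>
    show nxtOpt (s ++ [x]) j = nxtOpt s j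
    have hnx := lastOpt_none s x hl
    rcases lt_or_ge j s.length with hj | hj
    · unfold nxtOpt
      have hsj : s[j]? = some s[j] := List.getElem?_eq_getElem hj
      rw [List.getElem?_append_left hj, hsj]
      have h0 : j + 1 - s.length = 0 := by omega
      rw [List.drop_append, h0, List.drop_zero]
      simp only [Option.bind_some]
      rw [List.findIdx?_append]
      have hne : (s[j] == x) = false := by
        have := hnx j; rw [hsj] at this
        simp only [beq_eq_false_iff_ne, ne_eq]
        intro h; exact this (by rw [h])
      simp [List.findIdx?_cons, hne]
    · exact nxtOpt_high s x j hj
  | some v =>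
    obtain ⟨j0, hv, hlt, hget, hafter⟩ := lastOpt_some s x hl
    subst hv
    show nxtOpt (s ++ [x]) j = if ((j : Int)) = (j0 : Int) then some (s.length : Int) else nxtOpt s j
    have hx0 : s[j0] = x := by
      rw [List.getElem?_eq_getElem hlt] at hget; exact Option.some_injective _ hget
    by_cases hjj : ((j : Int)) = (j0 : Int)
    · have hj0 : j = j0 := by exact_mod_cast hjj
      subst hj0
      rw [if_pos hjj]
      unfold nxtOpt
      rw [List.getElem?_append_left hlt, List.getElem?_eq_getElem hlt]
      have h0 : j + 1 - s.length = 0 := by omega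
      rw [List.drop_append, h0, List.drop_zero]
      simp only [Option.bind_some]
      rw [List.findIdx?_append]
      have hfirst : (s.drop (j+1)).findIdx? (fun y => s[j] == y) = none := by
        rw [List.findIdx?_eq_none_iff]
        intro y hy
        exact hx0 ▸ mem_drop_ne s j x hafter y hy
      rw [hfirst]
      simp only [List.findIdx?_cons, hx0, beq_self_eq_true, if_pos, Option.map_some,
        Option.or, List.findIdx?_nil, List.length_drop]
      congr 1
      have : j + 1 + (0 + (s.length - (j + 1))) = s.length := by omega
      rw [this]
    · rw [if_neg hjj]
      have hjne : j ≠ j0 := by intro h; exact hjj (by rw [h])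
      rcases lt_or_ge j s.length with hj | hj
      · unfold nxtOpt
        have hsj : s[j]? = some s[j] := List.getElem?_eq_getElem hj
        rw [List.getElem?_append_left hj, hsj]
        have h0 : j + 1 - s.length = 0 := by omega
        rw [List.drop_append, h0, List.drop_zero]
        simp only [Option.bind_some]
        rw [List.findIdx?_append]
        by_cases hcx : s[j] = x
        · have hjlt : j < j0 := by
            rcases Nat.lt_or_ge j j0 with h' | h'
            · exact h'
            · exfalso
              have hj0j : j0 < j := by omega
              exact hafter j hj0j (by rw [hsj, hcx])
          have hmem : x ∈ s.drop (j+1) := by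
            rw [List.mem_iff_getElem]
            refine ⟨j0 - (j+1), by rw [List.length_drop]; omega, ?_⟩
            rw [List.getElem_drop]
            have h2 : j + 1 + (j0 - (j + 1)) = j0 := by omega
            simp only [h2]
            exact hx0
          have hfs : (s.drop (j+1)).findIdx? (fun y => s[j] == y) ≠ none := by
            rw [Ne, List.findIdx?_eq_none_iff]
            push Not
            exact ⟨x, hmem, by simp [hcx]⟩
          cases hfs' : (s.drop (j+1)).findIdx? (fun y => s[j] == y) with
          | none => exact absurd hfs' hfs
          | some m => simp
        · have hne : (s[j] == x) = false := beq_eq_false_iff_ne.mpr hcx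
          simp [List.findIdx?_cons, hne]
      · exact nxtOpt_high s x j hj

theorem func_eq_map (st : String) :
    func st = (List.range st.toList.length).map (fun (j : Nat) =>
      PySem.Str.slice st (some ((j : Nat) : Int))
        (some ((nxtOpt st.toList j).getD (st.toList.length : Int)))) := by
  simp only [func, PySem.Str.len_eq]
  rw [PySem.List.pyRange_zero_natCast, List.foldl_map]
  refine (PySem.List.foldl_congr_mem
    (g := fun ret_li (j : Nat) => ret_li ++ [PySem.Str.slice st (some ((j : Nat) : Int))
        (some ((nxtOpt st.toList j).getD (st.toList.length : Int)))]) _ _ _ ?_).trans ?_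
  case refine_2 => rw [PySem.List.foldl_append_singleton_eq_map, List.nil_append]
  intro acc j hj
  have hjlt : j < st.toList.length := List.mem_range.mp hj
  have hget : PySem.Str.pyGet? st ((j : Nat) : Int) = some st.toList[j] := by
    simp [List.getElem?_eq_getElem hjlt]
  rw [hget]
  simp only
  have hc1 : (String.ofList [st.toList[j]]).toList = [st.toList[j]] := by simp
  have hc2 : (((j : Nat) : Int) + 1) = (((j+1 : Nat) : Nat) : Int) := by push_cast; ring
  have hff : PySem.Str.findFrom st (String.ofList [st.toList[j]]) (((j : Nat) : Int) + 1)
      = PySem.Chars.findFrom st.toList [st.toList[j]] (((j+1 : Nat) : Int)) := by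
    rw [PySem.Str.findFrom_eq, hc1, hc2]
  rw [hff, PySem.Chars.findFrom_natCast _ _ (j+1) (by omega)]
  have hfind : PySem.Chars.find (st.toList.drop (j+1)) [st.toList[j]]
      = match (st.toList.drop (j+1)).findIdx? (fun y => st.toList[j] == y) with
        | some m => ((m : Nat) : Int)
        | none => -1 := by
    rw [PySem.Chars.find, find_go_singleton]
    cases (st.toList.drop (j+1)).findIdx? (fun y => st.toList[j] == y) <;> simp
  rw [hfind]
  unfold nxtOpt
  rw [List.getElem?_eq_getElem hjlt]
  simp only [Option.bind_some]
  cases hfi : (st.toList.drop (j+1)).findIdx? (fun y => st.toList[j] == y) with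
  | none => simp
  | some m =>
    have hm : ((m : Nat) : Int) ≠ -1 := by omega
    have hm2 : (((j+1 : Nat) : Int)) + ((m : Nat) : Int) ≠ -1 := by omega
    rw [if_neg hm]
    simp only [Option.map_some, Option.getD_some]
    rw [if_neg hm2]
    have harith : (((j+1 : Nat) : Int)) + ((m : Nat) : Int) = ((j + 1 + m : Nat) : Int) := by
      push_cast; ring
    have hcond : ∀ b : Int, (!(b == ((st.toList.length : Nat) : Int)) || (b == ((st.toList.length : Nat) : Int))) = true := by
      intro b; cases h : b == ((st.toList.length : Nat) : Int) <;> simp [h]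
    rw [hcond, if_pos rfl, harith]

-- ---------- B side ----------

-- positions of c in s, in increasing order
def posNat (s : List Char) (c : Char) : List Nat :=
  (List.range s.length).filter (fun k => s[k]? == some c)

theorem mem_posNat (s : List Char) (c : Char) (k : Nat) :
    k ∈ posNat s c ↔ s[k]? = some c := by
  unfold posNat
  rw [List.mem_filter, List.mem_range]
  constructor
  · rintro ⟨_, h⟩; exact beq_iff_eq.mp h
  · intro h
    obtain ⟨hlt, _⟩ := List.getElem?_eq_some_iff.mp h
    exact ⟨hlt, beq_iff_eq.mpr h⟩

theorem posNat_pairwise (s : List Char) (c : Char) : (posNat s c).Pairwise (· < ·) :=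
  List.Pairwise.filter _ (List.pairwise_lt_range)

theorem posNat_append (s : List Char) (x : Char) (c : Char) :
    posNat (s ++ [x]) c = posNat s c ++ (if x == c then [s.length] else []) := by
  unfold posNat
  rw [List.length_append, List.length_singleton, List.range_succ, List.filter_append]
  congr 1
  · apply List.filter_congr
    intro k hk
    rw [List.getElem?_append_left (List.mem_range.mp hk)]
  · have hx : (s ++ [x])[s.length]? = some x := by
      rw [List.getElem?_append_right (le_refl _)]
      simp
    by_cases h : x = c
    · simp [hx, h]
    · have hbc : (x == c) = false := beq_eq_false_iff_ne.mpr h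
      simp [hx, hbc, h]

theorem lastOpt_eq_getLast (s : List Char) (c : Char) :
    lastOpt s c = ((posNat s c).getLast?).map (fun k : Nat => (k : Int)) := by
  induction s using List.reverseRecOn with
  | nil => simp [lastOpt, PySem.List.enumerate_nil, posNat]
  | append_singleton s x ih =>
    rw [lastOpt_append, posNat_append]
    by_cases hx : x == c
    · simp [hx]
    · simp [hx, ih]

theorem nxtOpt_none_of_after (s : List Char) (j0 : Nat) (c : Char)
    (hget : s[j0]? = some c) (hafter : ∀ k : Nat, j0 < k → s[k]? ≠ some c) :
    nxtOpt s j0 = none := by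
  unfold nxtOpt
  rw [hget]
  simp only [Option.bind_some]
  have hfirst : (s.drop (j0+1)).findIdx? (fun y => c == y) = none := by
    rw [List.findIdx?_eq_none_iff]
    exact mem_drop_ne s j0 c hafter
  rw [hfirst]
  simp

theorem nxtOpt_some_append (s : List Char) (x : Char) (j : Nat) {w : Int}
    (h : nxtOpt s j = some w) : nxtOpt (s ++ [x]) j = some w := by
  rw [nxtOpt_append]
  cases hl : lastOpt s x with
  | none => exact h
  | some v =>
    obtain ⟨j0, hv, hlt, hget, hafter⟩ := lastOpt_some s x hl
    subst hv
    by_cases hjj : ((j : Int)) = (j0 : Int)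
    · exfalso
      have hj0 : j = j0 := by exact_mod_cast hjj
      subst hj0
      rw [nxtOpt_none_of_after s j x hget hafter] at h
      simp at h
    · simp only [hjj, if_false]
      exact h

theorem posNat_chain (s : List Char) (c : Char) :
    (posNat s c).IsChain (fun i j => nxtOpt s i = some ((j : Nat) : Int)) := by
  induction s using List.reverseRecOn with
  | nil => simp [posNat]
  | append_singleton s x ih =>
    rw [posNat_append, List.isChain_append]
    refine ⟨ih.imp (fun a b h => nxtOpt_some_append s x a h), ?_, ?_⟩
    · by_cases hx : x == c <;> simp [hx]
    · intro i hi j hj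
      by_cases hx : x == c
      · simp only [hx, if_true, List.head?_cons, Option.mem_def, Option.some.injEq] at hj
        subst hj
        rw [nxtOpt_append, lastOpt_eq_getLast]
        have hc : c = x := (beq_iff_eq.mp hx).symm
        rw [hc] at hi
        rw [Option.mem_def] at hi
        rw [hi]
        simp
      · simp [hx] at hj

theorem posNat_getLast_none (s : List Char) (c : Char) (i : Nat)
    (h : (posNat s c).getLast? = some i) : nxtOpt s i = none := by
  have hi : i ∈ posNat s c := List.mem_of_getLast? h
  have hgi : s[i]? = some c := (mem_posNat s c i).mp hi
  apply nxtOpt_none_of_after s i c hgi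
  intro k hk hkc
  have hkmem : k ∈ posNat s c := (mem_posNat s c k).mpr hkc
  have hpw := posNat_pairwise s c
  obtain ⟨l', hl'⟩ := List.getLast?_eq_some_iff.mp h
  rw [hl'] at hkmem hpw
  rcases List.mem_append.mp hkmem with hk1 | hk2
  · have := (List.pairwise_append.mp hpw).2.2 k hk1 i (List.mem_singleton_self i)
    omega
  · rw [List.mem_singleton.mp hk2] at hk
    omega

-- the body of B's outer loop, as a named function (definitionally equal to the port's lambda)
def writeGroup (st : String) (res : List String) (idxs : List Int) : List String :=
  let res1 :=
    (idxs.zip (idxs.drop 1)).foldl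
      (fun res ij => PySem.List.pySetD res ij.1
        (PySem.Str.slice st (some ij.1) (some ij.2))) res
  match PySem.List.pyGet? idxs (-1) with
  | some i => PySem.List.pySetD res1 i (PySem.Str.slice st (some i) none)
  | none => res1

theorem wg_nil (st : String) (res : List String) : writeGroup st res [] = res := by
  simp [writeGroup, PySem.List.pyGet?_neg_one]

theorem wg_single (st : String) (res : List String) (i : Int) :
    writeGroup st res [i] = PySem.List.pySetD res i (PySem.Str.slice st (some i) none) := by
  simp [writeGroup, PySem.List.pyGet?_neg_one]

theorem wg_cons2 (st : String) (res : List String) (i j : Int) (rest : List Int) :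
    writeGroup st res (i :: j :: rest) =
      writeGroup st (PySem.List.pySetD res i (PySem.Str.slice st (some i) (some j)))
        (j :: rest) := by
  simp [writeGroup, PySem.List.pyGet?_neg_one, List.getLast?_cons_cons]

theorem length_writeGroup (st : String) (res : List String) (idxs : List Int) :
    (writeGroup st res idxs).length = res.length := by
  unfold writeGroup
  have hfold : ∀ (ps : List (Int × Int)) (r : List String),
      (ps.foldl (fun res ij => PySem.List.pySetD res ij.1
        (PySem.Str.slice st (some ij.1) (some ij.2))) r).length = r.length := by
    intro ps
    induction ps with
    | nil => intro r; rfl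
    | cons p t ih => intro r; rw [List.foldl_cons, ih]; simp [PySem.List.length_pySetD]
  cases PySem.List.pyGet? idxs (-1) with
  | none => exact hfold _ _
  | some i => simp [PySem.List.length_pySetD, hfold]

theorem slice_from_eq_to_length (st : String) (i : Nat) :
    PySem.Str.slice st (some (i : Int)) none
      = PySem.Str.slice st (some (i : Int)) (some (st.toList.length : Int)) := by
  show String.ofList (PySem.List.slice st.toList (some (i : Int)) none)
      = String.ofList (PySem.List.slice st.toList (some (i : Int)) (some (st.toList.length : Int)))
  rw [PySem.List.slice_from_natCast, PySem.List.slice_natCast]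
  congr 1
  rw [List.take_of_length_le (by simp)]

theorem wg_spec (st : String) (l : List Nat) :
    ∀ (res : List String), res.length = st.toList.length →
    (∀ k ∈ l, k < st.toList.length) →
    l.IsChain (fun i j => nxtOpt st.toList i = some ((j : Nat) : Int)) →
    (∀ i, l.getLast? = some i → nxtOpt st.toList i = none) →
    l.Pairwise (· < ·) →
    ∀ m : Nat, (writeGroup st res (l.map (fun k : Nat => (k : Int))))[m]? =
      if m ∈ l then some (PySem.Str.slice st (some (m : Int))
        (some ((nxtOpt st.toList m).getD (st.toList.length : Int)))) else res[m]? := by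
  induction l with
  | nil => intro res _ _ _ _ _ m; simp [wg_nil]
  | cons i t ih =>
    intro res hlen hmem hch hlast hpw m
    cases t with
    | nil =>
      simp only [List.map_cons, List.map_nil]
      rw [wg_single, PySem.List.pySetD_natCast]
      have hnone : nxtOpt st.toList i = none := hlast i rfl
      by_cases hmi : m = i
      · subst hmi
        rw [List.getElem?_set_self (by rw [hlen]; exact hmem m (by simp))]
        simp [hnone, slice_from_eq_to_length]
      · rw [List.getElem?_set_ne (fun h => hmi h.symm)]
        simp [hmi]
    | cons j r =>
      simp only [List.map_cons]
      rw [wg_cons2, PySem.List.pySetD_natCast]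
      have hrel : nxtOpt st.toList i = some ((j : Nat) : Int) := (List.isChain_cons_cons.mp hch).1
      have hih := ih (res.set i (PySem.Str.slice st (some (i:Int)) (some (j:Int))))
        (by simp [hlen])
        (fun k hk => hmem k (List.mem_cons_of_mem _ hk))
        (List.isChain_cons_cons.mp hch).2
        (fun k hk => hlast k (by rw [List.getLast?_cons_cons]; exact hk))
        (List.Pairwise.of_cons hpw) m
      simp only [List.map_cons] at hih
      rw [hih]
      by_cases hmi : m = i
      · subst hmi
        have hnot : m ∉ j :: r := by
          intro hmem'
          have := (List.pairwise_cons.mp hpw).1 m hmem'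
          omega
        rw [if_neg hnot, List.getElem?_set_self (by rw [hlen]; exact hmem m (by simp))]
        simp [hrel]
      · rw [List.getElem?_set_ne (fun h => hmi h.symm)]
        by_cases hmt : m ∈ j :: r
        · simp [hmt, List.mem_cons_of_mem _ hmt]
        · have hno : m ∉ i :: j :: r := by
            intro h
            rcases List.mem_cons.mp h with h | h
            · exact hmi h
            · exact hmt h
          simp [hmt, hno]

theorem outer_length (st : String) (C : List Char) (res : List String) :
    ((C.map (fun c => (posNat st.toList c).map (fun k : Nat => (k : Int)))).foldl
      (writeGroup st) res).length = res.length := by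
  induction C generalizing res with
  | nil => rfl
  | cons c C' ih =>
    rw [List.map_cons, List.foldl_cons, ih, length_writeGroup]

theorem outer_spec (st : String) (C : List Char) :
    ∀ (res : List String), res.length = st.toList.length →
    ∀ (m : Nat) (cm : Char), st.toList[m]? = some cm →
    ((C.map (fun c => (posNat st.toList c).map (fun k : Nat => (k : Int)))).foldl
        (writeGroup st) res)[m]? =
      if cm ∈ C then some (PySem.Str.slice st (some (m : Int))
        (some ((nxtOpt st.toList m).getD (st.toList.length : Int)))) else res[m]? := by
  induction C with
  | nil => intro res _ m cm _; simp
  | cons c C' ih =>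
    intro res hlen m cm hm
    rw [List.map_cons, List.foldl_cons]
    have hstep := wg_spec st (posNat st.toList c) res hlen
      (fun k hk => by
        obtain ⟨hlt, _⟩ := List.getElem?_eq_some_iff.mp ((mem_posNat st.toList c k).mp hk)
        exact hlt)
      (posNat_chain st.toList c)
      (posNat_getLast_none st.toList c)
      (posNat_pairwise st.toList c)
    have hlen' : (writeGroup st res ((posNat st.toList c).map (fun k : Nat => (k : Int)))).length
        = st.toList.length := by rw [length_writeGroup, hlen]
    rw [ih _ hlen' m cm hm]
    by_cases hC' : cm ∈ C'
    · simp [hC', List.mem_cons_of_mem _ hC']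
    · rw [if_neg hC', hstep m]
      by_cases hcc : cm = c
      · subst hcc
        have hmm : m ∈ posNat st.toList cm := (mem_posNat st.toList cm m).mpr hm
        simp [hmm]
      · have h1 : m ∉ posNat st.toList c := by
          intro h
          have h2 := (mem_posNat st.toList c m).mp h
          rw [hm] at h2
          exact hcc (Option.some_injective _ h2)
        have h2 : cm ∉ c :: C' := by
          intro h
          rcases List.mem_cons.mp h with h | h
          · exact hcc h
          · exact hC' h
        simp [h1, h2]

theorem filter_enum_eq (s : List Char) (c : Char) :
    List.map ((fun (x : Char × Int) => x.2) ∘ fun (p : Int × Char) => (p.2, p.1))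
      (List.filter ((fun (p : Char × Int) => p.1 == c) ∘ fun (p : Int × Char) => (p.2, p.1))
        (PySem.List.enumerate s 0))
    = (posNat s c).map (fun k : Nat => (k : Int)) := by
  induction s using List.reverseRecOn with
  | nil => simp [PySem.List.enumerate_nil, posNat]
  | append_singleton s x ih =>
    rw [PySem.List.enumerate_append, PySem.List.enumerate_cons, PySem.List.enumerate_nil,
      List.filter_append, List.map_append, posNat_append, List.map_append, ih]
    congr 1
    by_cases hx : x == c
    · simp [hx]
    · simp [hx]

theorem occ_getD (s : List Char) (c : Char) :
    ((PySem.List.enumerate s 0).foldl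
      (fun (d : PySem.Dict Char (List Int)) ic => d.modify ic.2 [] (· ++ [ic.1]))
      PySem.Dict.empty).getD c []
    = (posNat s c).map (fun k : Nat => (k : Int)) := by
  have hswap : (PySem.List.enumerate s 0).foldl
      (fun (d : PySem.Dict Char (List Int)) ic => d.modify ic.2 [] (· ++ [ic.1]))
      PySem.Dict.empty
    = (((PySem.List.enumerate s 0).map (fun p => (p.2, p.1))).foldl
      (fun (d : PySem.Dict Char (List Int)) p => d.modify p.1 [] (· ++ [p.2]))
      PySem.Dict.empty) := by
    rw [List.foldl_map]
  rw [hswap, PySem.Dict.getD_foldl_modify_append, PySem.Dict.getD_empty, List.nil_append,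
    List.filter_map, List.map_map]
  exact filter_enum_eq s c

theorem occ_values (s : List Char) :
    ((PySem.List.enumerate s 0).foldl
      (fun (d : PySem.Dict Char (List Int)) ic => d.modify ic.2 [] (· ++ [ic.1]))
      PySem.Dict.empty).values
    = (PySem.Set.ofList s).map (fun c => (posNat s c).map (fun k : Nat => (k : Int))) := by
  have hkeys : ((PySem.List.enumerate s 0).foldl
      (fun (d : PySem.Dict Char (List Int)) ic => d.modify ic.2 [] (· ++ [ic.1]))
      PySem.Dict.empty).keys = PySem.Set.ofList s := by
    have h := PySem.Dict.keys_foldl_modify_key (PySem.List.enumerate s 0)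
      (fun ic => ic.2) [] (fun _ ic => (· ++ [ic.1])) PySem.Dict.empty
    simp only at h
    rw [h, PySem.Dict.keys_empty, PySem.List.map_snd_enumerate, PySem.Set.update_nil_left]
  have hnodup : ((PySem.List.enumerate s 0).foldl
      (fun (d : PySem.Dict Char (List Int)) ic => d.modify ic.2 [] (· ++ [ic.1]))
      PySem.Dict.empty).keys.Nodup := by
    rw [hkeys]; exact PySem.Set.nodup_ofList s
  rw [PySem.Dict.values_eq_map_keys _ hnodup [], hkeys]
  apply List.map_congr_left
  intro c _
  exact occ_getD s c

theorem func_alt_eq_map (st : String) :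
    func_alt st = (List.range st.toList.length).map (fun (j : Nat) =>
      PySem.Str.slice st (some ((j : Nat) : Int))
        (some ((nxtOpt st.toList j).getD (st.toList.length : Int)))) := by
  have hbody : func_alt st
      = (((PySem.List.enumerate st.toList 0).foldl
          (fun (d : PySem.Dict Char (List Int)) ic => d.modify ic.2 [] (· ++ [ic.1]))
          PySem.Dict.empty).values).foldl (writeGroup st)
        (List.replicate (PySem.Str.len st).toNat "") := rfl
  have hn : (PySem.Str.len st).toNat = st.toList.length := by
    simp [PySem.Str.len_eq]
  rw [hbody, hn, occ_values]
  have hlen0 : (List.replicate st.toList.length ("" : String)).length = st.toList.length := by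
    simp
  apply List.ext_getElem?
  intro m
  by_cases hm : m < st.toList.length
  · have hcm : st.toList[m]? = some st.toList[m] := List.getElem?_eq_getElem hm
    rw [outer_spec st (PySem.Set.ofList st.toList) _ hlen0 m st.toList[m] hcm]
    have hmem : st.toList[m] ∈ PySem.Set.ofList st.toList := by
      rw [PySem.Set.mem_ofList]
      exact List.getElem_mem hm
    rw [if_pos hmem, List.getElem?_map, List.getElem?_range hm]
    simp
  · rw [List.getElem?_eq_none (by rw [outer_length st _ _, hlen0]; omega),
      List.getElem?_eq_none (by simp only [List.length_map, List.length_range]; omega)]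

-- ===== VERDICT (by name: the statement is the Claim_ definition above) =====
theorem func_spec : Claim_equal_func := by
  intro st _
  unfold Spec_func
  rw [func_eq_map, func_alt_eq_map]
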